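-- pv_equiv track=rewrite | github.com/Osteoclave/game-tools | snes/earthbound_comp.py | lookForPastBytesForward
-- ===== SOURCE A (Python) =====
-- def lookForPastBytesForward(inBuffer, currentIndex):
--     bestIndex = 0
--     bestLength = 0
--
--     # Don't look past the end of the buffer.
--     compareLimit = len(inBuffer) - currentIndex
--
--     # Don't look too far ahead.
--     if compareLimit > 1024:
--         compareLimit = 1024
--
--     for i in range(currentIndex):
--         # Count how many sequential bytes match (possibly zero).
--         currentLength = 0
--         for j in range(compareLimit):
--             if inBuffer[i + j] == inBuffer[currentIndex + j]:
--                 currentLength += 1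
--             else:
--                 break
--
--         # Keep track of the largest match we've seen.
--         if currentLength > bestLength:
--             bestIndex = i
--             bestLength = currentLength
--
--     return bestLength, bestIndex
-- ===== SOURCE B (Python) =====
-- def lookForPastBytesForward(inBuffer, currentIndex):
--     n = len(inBuffer)
--     limit = n - currentIndex
--     if limit > 1024:
--         limit = 1024
--     if currentIndex <= 0 or limit <= 0:
--         return 0, 0
--     # Index every byte value in the searched prefix to its positions (ascending),
--     # so only starts whose first byte already matches are examined.
--     positions = {}
--     for i in range(currentIndex):
--         positions.setdefault(inBuffer[i], []).append(i)
--     target = inBuffer[currentIndex]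
--     bestLength = 0
--     bestIndex = 0
--     for i in positions.get(target, []):
--         length = 1
--         while length < limit and inBuffer[i + length] == inBuffer[currentIndex + length]:
--             length += 1
--         if length > bestLength:
--             bestLength = length
--             bestIndex = i
--     return bestLength, bestIndex
-- ===== Notes on version B (the rewrite author's own statement) =====
-- stated objective: alternative
-- what changed: B builds a byte-value-to-positions dictionary over the searched prefix once and computes match lengths only for starts whose first byte equals the target byte (entering the inner comparison at offset 1), instead of A's inner comparison loop at every prior index.
import Mathlib
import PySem

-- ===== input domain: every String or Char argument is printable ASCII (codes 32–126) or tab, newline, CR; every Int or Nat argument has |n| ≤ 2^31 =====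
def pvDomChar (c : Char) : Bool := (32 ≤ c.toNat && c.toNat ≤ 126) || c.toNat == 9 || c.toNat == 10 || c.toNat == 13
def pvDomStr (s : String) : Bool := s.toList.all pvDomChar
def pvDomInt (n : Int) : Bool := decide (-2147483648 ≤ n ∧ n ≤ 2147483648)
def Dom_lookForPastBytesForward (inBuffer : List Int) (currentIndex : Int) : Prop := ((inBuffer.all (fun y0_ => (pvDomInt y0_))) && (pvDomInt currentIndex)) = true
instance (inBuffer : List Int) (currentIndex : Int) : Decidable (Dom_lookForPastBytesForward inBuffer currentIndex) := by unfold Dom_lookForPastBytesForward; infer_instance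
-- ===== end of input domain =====

-- B replaces A's scan over every prior index by a byte→positions hash index built once,
-- so only starts whose first byte already matches the target are examined (alternative; same worst case).
-- All buffer indexing in both programs is provably in range, so xs[i] is ported as pyGetD with default 0 (exact here).


-- ===== PORT A =====
-- inner loop: 'for j in ...: if inBuffer[i+j]==inBuffer[currentIndex+j]: currentLength += 1 else: break'
def pvInnerA (inBuffer : List Int) (i ci : Int) : List Int → Int
  | [] => 0
  | j :: js =>
      if PySem.List.pyGetD inBuffer (i + j) 0 = PySem.List.pyGetD inBuffer (ci + j) 0 then
        1 + pvInnerA inBuffer i ci js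
      else 0

def lookForPastBytesForward (inBuffer : List Int) (currentIndex : Int) : List Int :=
  let compareLimit0 : Int := (inBuffer.length : Int) - currentIndex
  let compareLimit : Int := if compareLimit0 > 1024 then 1024 else compareLimit0
  -- state (bestLength, bestIndex)
  let res := (PySem.List.pyRange 0 currentIndex 1).foldl
    (fun (st : Int × Int) i =>
      let currentLength := pvInnerA inBuffer i currentIndex (PySem.List.pyRange 0 compareLimit 1)
      if currentLength > st.1 then (currentLength, i) else st)
    (0, 0)
  [res.1, res.2]

-- ===== PORT B =====
-- 'length = 1; while length < limit and inBuffer[i+length] == inBuffer[currentIndex+length]: length += 1'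
def pvWhileB (inBuffer : List Int) (i ci limit : Int) : Int → Nat → Int
  | length, 0 => length
  | length, fuel + 1 =>
      if length < limit ∧ PySem.List.pyGetD inBuffer (i + length) 0 = PySem.List.pyGetD inBuffer (ci + length) 0 then
        pvWhileB inBuffer i ci limit (length + 1) fuel
      else length

def lookForPastBytesForward_alt (inBuffer : List Int) (currentIndex : Int) : List Int :=
  let n : Int := (inBuffer.length : Int)
  let limit0 : Int := n - currentIndex
  let limit : Int := if limit0 > 1024 then 1024 else limit0
  if currentIndex ≤ 0 ∨ limit ≤ 0 then [0, 0]
  else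
    let positions : PySem.Dict Int (List Int) :=
      (PySem.List.pyRange 0 currentIndex 1).foldl
        (fun d i => d.modify (PySem.List.pyGetD inBuffer i 0) [] (fun l => l ++ [i]))
        PySem.Dict.empty
    let target : Int := PySem.List.pyGetD inBuffer currentIndex 0
    let res := (positions.getD target []).foldl
      (fun (st : Int × Int) i =>
        let length := pvWhileB inBuffer i currentIndex limit 1 limit.toNat
        if length > st.1 then (length, i) else st)
      (0, 0)
    [res.1, res.2]

-- ===== PRECONDITION & SPEC =====
def Spec_lookForPastBytesForward (inBuffer : List Int) (currentIndex : Int) (out : List Int) : Prop := out = lookForPastBytesForward_alt inBuffer currentIndex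
instance (inBuffer : List Int) (currentIndex : Int) (out : List Int) : Decidable (Spec_lookForPastBytesForward inBuffer currentIndex out) := by unfold Spec_lookForPastBytesForward; infer_instance

-- ===== CLAIM (what is proved, stated in full; the proofs are below) =====
def Claim_equal_lookForPastBytesForward : Prop := ∀ (inBuffer : List Int) (currentIndex : Int), Dom_lookForPastBytesForward inBuffer currentIndex → Spec_lookForPastBytesForward inBuffer currentIndex (lookForPastBytesForward inBuffer currentIndex)

-- ===== LEMMAS AND PROOFS =====

-- A's inner count, started after a first match at offset j-1, equals B's while loop entered with length = j.
lemma pvInner_eq_while (inBuffer : List Int) (i ci limit : Int) :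
    ∀ (k : Nat) (j : Int) (f : Nat), j + k = limit → k ≤ f →
      j + pvInnerA inBuffer i ci (PySem.List.pyRange j limit 1) = pvWhileB inBuffer i ci limit j f := by
  intro k
  induction k with
  | zero =>
      intro j f hk _
      have hj : limit ≤ j := by omega
      rw [PySem.List.pyRange_one_eq_nil hj]
      have hlt : ¬ (j < limit) := by omega
      cases f with
      | zero => simp [pvInnerA, pvWhileB]
      | succ f => simp [pvInnerA, pvWhileB, hlt]
  | succ k ih =>
      intro j f hk hf
      have hj : j < limit := by omega
      obtain ⟨f', rfl⟩ : ∃ f', f = f' + 1 := ⟨f - 1, by omega⟩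
      rw [PySem.List.pyRange_one_cons hj]
      by_cases hmatch : PySem.List.pyGetD inBuffer (i + j) 0 = PySem.List.pyGetD inBuffer (ci + j) 0
      · simp only [pvInnerA, pvWhileB, hmatch, hj, and_self, if_true]
        have := ih (j + 1) f' (by omega) (by omega)
        omega
      · simp [pvInnerA, pvWhileB, hmatch, hj]

-- Dropping the zero-length candidates: folding A's step over a list equals folding it over the
-- sublist where p holds, provided the count is 0 whenever p fails and the running best is ≥ 0.
lemma foldl_drop_zero (cnt : Int → Int) (p : Int → Bool) :
    ∀ (l : List Int) (st : Int × Int), 0 ≤ st.1 → (∀ i ∈ l, p i = false → cnt i = 0) →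
      l.foldl (fun (st : Int × Int) i => if cnt i > st.1 then (cnt i, i) else st) st
      = (l.filter p).foldl (fun (st : Int × Int) i => if cnt i > st.1 then (cnt i, i) else st) st := by
  intro l
  induction l with
  | nil => intro st _ _; rfl
  | cons i l ih =>
      intro st hst hp
      by_cases hpi : p i = true
      · rw [List.filter_cons_of_pos hpi]
        simp only [List.foldl_cons]
        by_cases hgt : cnt i > st.1
        · rw [if_pos hgt]
          exact ih _ (by simp; omega) (fun x hx => hp x (List.mem_cons_of_mem _ hx))
        · rw [if_neg hgt]
          exact ih _ hst (fun x hx => hp x (List.mem_cons_of_mem _ hx))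
      · have hpf : p i = false := by simpa using hpi
        rw [List.filter_cons_of_neg (by simp [hpf])]
        simp only [List.foldl_cons]
        have hz : cnt i = 0 := hp i (List.mem_cons_self) hpf
        rw [if_neg (by omega)]
        exact ih _ hst (fun x hx => hp x (List.mem_cons_of_mem _ hx))

-- B's candidate list is exactly the filtered index range.
lemma candidates_eq (inBuffer : List Int) (ci target : Int) :
    (((PySem.List.pyRange 0 ci 1).foldl
        (fun (d : PySem.Dict Int (List Int)) i => d.modify (PySem.List.pyGetD inBuffer i 0) [] (fun l => l ++ [i]))
        PySem.Dict.empty).getD target [])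
    = (PySem.List.pyRange 0 ci 1).filter (fun i => PySem.List.pyGetD inBuffer i 0 == target) := by
  have h := PySem.Dict.getD_foldl_modify_append
      ((PySem.List.pyRange 0 ci 1).map (fun i => (PySem.List.pyGetD inBuffer i 0, i)))
      (PySem.Dict.empty) target
  rw [List.foldl_map] at h
  simp only [h, List.filter_map, List.map_map]
  simp [Function.comp_def, List.map_id']

theorem lookForPastBytesForward_spec_aux (inBuffer : List Int) (currentIndex : Int) :
    lookForPastBytesForward inBuffer currentIndex = lookForPastBytesForward_alt inBuffer currentIndex := by
  unfold lookForPastBytesForward lookForPastBytesForward_alt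
  dsimp only
  set n : Int := (inBuffer.length : Int) with hn
  set limit : Int := if n - currentIndex > 1024 then 1024 else n - currentIndex with hlimit
  by_cases hguard : currentIndex ≤ 0 ∨ limit ≤ 0
  · rw [if_pos hguard]
    rcases hguard with hci | hlim
    · rw [PySem.List.pyRange_one_eq_nil hci]; rfl
    · -- every count is over an empty range, hence 0; the fold never moves off (0,0)
      have hcnt : ∀ i, pvInnerA inBuffer i currentIndex (PySem.List.pyRange 0 limit 1) = 0 := by
        intro i; rw [PySem.List.pyRange_one_eq_nil hlim]; rfl
      rw [foldl_drop_zero (fun i => pvInnerA inBuffer i currentIndex (PySem.List.pyRange 0 limit 1))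
            (fun _ => false) _ (0, 0) (by norm_num) (fun i _ _ => hcnt i)]
      simp
  · rw [if_neg hguard]
    simp only [not_or, not_le] at hguard
    obtain ⟨hci, hlim⟩ := hguard
    set target : Int := PySem.List.pyGetD inBuffer currentIndex 0 with htarget
    set p : Int → Bool := fun i => PySem.List.pyGetD inBuffer i 0 == target with hp
    set cntA : Int → Int := fun i => pvInnerA inBuffer i currentIndex (PySem.List.pyRange 0 limit 1) with hcntA
    set cntB : Int → Int := fun i => pvWhileB inBuffer i currentIndex limit 1 limit.toNat with hcntB
    have hdrop := foldl_drop_zero cntA p (PySem.List.pyRange 0 currentIndex 1) (0, 0) (by norm_num)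
      (by
        intro i _ hpi
        have hne : PySem.List.pyGetD inBuffer i 0 ≠ target := by
          intro h; rw [hp] at hpi; simp [h] at hpi
        rw [hcntA]
        simp only
        rw [PySem.List.pyRange_one_cons hlim]
        simp only [pvInnerA, add_zero]
        rw [if_neg hne])
    have hfold : ((PySem.List.pyRange 0 currentIndex 1).filter p).foldl
          (fun (st : Int × Int) i => if cntA i > st.1 then (cntA i, i) else st) (0, 0)
        = ((PySem.List.pyRange 0 currentIndex 1).filter p).foldl
          (fun (st : Int × Int) i => if cntB i > st.1 then (cntB i, i) else st) (0, 0) := by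
      apply PySem.List.foldl_congr_mem
      intro acc i hi
      have hpi : p i = true := List.of_mem_filter hi
      have hmatch : PySem.List.pyGetD inBuffer i 0 = target := by
        rw [hp] at hpi; simpa using hpi
      have hcnt : cntA i = cntB i := by
        rw [hcntA, hcntB]
        simp only
        rw [PySem.List.pyRange_one_cons hlim]
        simp only [pvInnerA, add_zero]
        rw [if_pos (by rw [hmatch, htarget]), show ((0:Int)+1) = 1 by norm_num]
        have := pvInner_eq_while inBuffer i currentIndex limit (limit - 1).toNat 1 limit.toNat
          (by omega) (by omega)
        omega
      rw [hcnt]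
    rw [candidates_eq inBuffer currentIndex target, hdrop, hfold]

-- ===== VERDICT (by name: the statement is the Claim_ definition above) =====
theorem lookForPastBytesForward_spec : Claim_equal_lookForPastBytesForward := by
  intro inBuffer currentIndex _
  exact lookForPastBytesForward_spec_aux inBuffer currentIndex
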